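-- pv_equiv track=rewrite | github.com/poleonia/Experiments-for-Paper-1- | matrix_problems_cpu_for_loop_solutions.py | solve_problem_003_cpu
-- ===== SOURCE A (Python) =====
-- def solve_problem_003_cpu(A, B):
--     result = []
--     for i in range(len(A)):
--         row = []
--         for j in range(len(B[0])):
--             sum_product = sum(A[i][k] * B[k][j] for k in range(len(B)))
--             row.append(sum_product ** 2)
--         result.append(row)
--     return result
-- ===== SOURCE B (Python) =====
-- def solve_problem_003_cpu(A, B):
--     # ikj accumulation per output row, then a separate elementwise squaring pass
--     if not A:
--         return []
--     n = len(B[0])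
--     result = []
--     for a_row in A:
--         acc = [0] * n
--         for k in range(len(B)):
--             b_row = B[k]
--             acc = [acc[j] + a_row[k] * b_row[j] for j in range(n)]
--         result.append([x * x for x in acc])
--     return result
-- ===== Notes on version B (the rewrite author's own statement) =====
-- stated objective: alternative
-- what changed: B computes the product with an ikj accumulation pattern (a running accumulator row updated for each k, with an explicit separate elementwise squaring pass) instead of A's ijk nested loops with an inner generator-sum followed by squaring inline.
import Mathlib
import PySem

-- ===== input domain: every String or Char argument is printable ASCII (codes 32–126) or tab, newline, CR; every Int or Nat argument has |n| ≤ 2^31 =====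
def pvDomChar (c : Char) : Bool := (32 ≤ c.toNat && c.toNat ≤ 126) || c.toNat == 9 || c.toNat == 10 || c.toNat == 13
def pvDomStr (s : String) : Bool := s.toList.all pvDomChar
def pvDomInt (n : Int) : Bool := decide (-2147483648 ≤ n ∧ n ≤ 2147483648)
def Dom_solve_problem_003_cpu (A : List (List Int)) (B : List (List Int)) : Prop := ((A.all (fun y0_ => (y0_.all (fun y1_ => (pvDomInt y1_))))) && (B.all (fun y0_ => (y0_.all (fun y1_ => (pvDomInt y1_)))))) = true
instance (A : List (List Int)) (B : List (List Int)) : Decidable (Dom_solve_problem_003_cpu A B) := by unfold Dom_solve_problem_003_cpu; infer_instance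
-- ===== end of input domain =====

-- B replaces A's ijk loops with inner generator-sum by an ikj accumulator row plus a
-- separate elementwise squaring pass (objective: alternative; equivalence is about the
-- return value; neither program mutates its arguments).

-- ===== PORT A =====
-- indices are in range on every input admitted by Pre_, so getD is exact there
def solve_problem_003_cpu (A : List (List Int)) (B : List (List Int)) : List (List Int) :=
  (List.range A.length).map (fun i =>
    (List.range (B.headD []).length).map (fun j =>
      ((List.range B.length).foldl
        (fun s k => s + (A.getD i []).getD k 0 * (B.getD k []).getD j 0) 0) ^ 2))

-- ===== PORT B =====
def solve_problem_003_cpu_alt (A : List (List Int)) (B : List (List Int)) : List (List Int) :=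
  if A = [] then []
  else
    let n := (B.headD []).length
    A.foldl (fun result a_row =>
      let acc := (List.range B.length).foldl
        (fun acc k =>
          (List.range n).map (fun j => acc.getD j 0 + a_row.getD k 0 * (B.getD k []).getD j 0))
        (List.replicate n 0)
      result ++ [acc.map (fun x => x * x)]) []

-- ===== PRECONDITION & SPEC =====
-- Pre_ excludes exactly the inputs where the Python A raises IndexError: a non-empty A with
-- an empty B (B[0]), or (when len(B[0]) > 0) a row of A shorter than len(B) or a row of B
-- shorter than len(B[0]).
def Pre_solve_problem_003_cpu (A : List (List Int)) (B : List (List Int)) : Prop :=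
  A = [] ∨ (B ≠ [] ∧ ((B.headD []).length = 0 ∨
    ((∀ r ∈ A, B.length ≤ r.length) ∧ (∀ r ∈ B, (B.headD []).length ≤ r.length))))
instance (A : List (List Int)) (B : List (List Int)) : Decidable (Pre_solve_problem_003_cpu A B) := by unfold Pre_solve_problem_003_cpu; infer_instance
def pvWitness_solve_problem_003_cpu : List (List Int) × List (List Int) :=
  ([[1, 2], [3, 4]], [[5, 6], [7, 8]])
def Spec_solve_problem_003_cpu (A : List (List Int)) (B : List (List Int)) (out : List (List Int)) : Prop := out = solve_problem_003_cpu_alt A B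
instance (A : List (List Int)) (B : List (List Int)) (out : List (List Int)) : Decidable (Spec_solve_problem_003_cpu A B out) := by unfold Spec_solve_problem_003_cpu; infer_instance

-- ===== CLAIM (what is proved, stated in full; the proofs are below) =====
def Claim_equal_solve_problem_003_cpu : Prop := ∀ (A : List (List Int)) (B : List (List Int)), Dom_solve_problem_003_cpu A B → Pre_solve_problem_003_cpu A B → Spec_solve_problem_003_cpu A B (solve_problem_003_cpu A B)

-- ===== LEMMAS AND PROOFS =====

-- getD of a map over range, at an in-range index
theorem getD_map_range (f : Nat → Int) (n j : Nat) (hj : j < n) :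
    ((List.range n).map f).getD j 0 = f j := by
  rw [List.getD_eq_getElem?_getD, List.getElem?_map, List.getElem?_range hj]
  rfl

-- the accumulator after folding over range K holds, at each j < n, the partial k-sum
theorem acc_invariant (B : List (List Int)) (a_row : List Int) (n K : Nat) :
    (List.range K).foldl
        (fun acc k =>
          (List.range n).map (fun j => acc.getD j 0 + a_row.getD k 0 * (B.getD k []).getD j 0))
        (List.replicate n 0)
      = (List.range n).map (fun j =>
          (List.range K).foldl
            (fun s k => s + a_row.getD k 0 * (B.getD k []).getD j 0) 0) := by
  induction K with
  | zero =>
      simp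
  | succ K ih =>
      rw [List.range_succ]
      simp only [List.foldl_append, List.foldl_cons, List.foldl_nil, ih]
      refine List.map_congr_left (fun j hj => ?_)
      rw [getD_map_range _ _ _ (List.mem_range.mp hj)]

-- folding append-singleton over a list builds init ++ map
theorem foldl_append_singleton (g : List Int → List Int) (l : List (List Int))
    (init : List (List Int)) :
    l.foldl (fun r a => r ++ [g a]) init = init ++ l.map g := by
  induction l generalizing init with
  | nil => simp
  | cons a l ih => simp [ih]

-- mapping over indices equals mapping over the list
theorem map_range_getD (f : List Int → List Int) (l : List (List Int)) :
    (List.range l.length).map (fun i => f (l.getD i [])) = l.map f := by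
  induction l with
  | nil => simp
  | cons a l ih =>
      rw [List.length_cons, List.range_succ_eq_map, List.map_cons, List.map_map]
      simp only [List.getD_cons_zero, List.map_cons]
      refine congrArg _ ?_
      simpa using ih

-- ===== VERDICT (by name: the statement is the Claim_ definition above) =====
theorem solve_problem_003_cpu_spec : Claim_equal_solve_problem_003_cpu := by
  intro A B _ _
  show _ = _
  unfold solve_problem_003_cpu solve_problem_003_cpu_alt
  by_cases hA : A = []
  · subst hA; simp
  · rw [if_neg hA]
    rw [foldl_append_singleton, List.nil_append,
      ← map_range_getD (fun a_row =>
        ((List.range B.length).foldl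
          (fun acc k =>
            (List.range (B.headD []).length).map
              (fun j => acc.getD j 0 + a_row.getD k 0 * (B.getD k []).getD j 0))
          (List.replicate (B.headD []).length 0)).map (fun x => x * x)) A]
    refine List.map_congr_left (fun i _ => ?_)
    rw [acc_invariant, List.map_map]
    refine List.map_congr_left (fun j _ => ?_)
    simp [pow_two]
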